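-- pv_equiv track=rewrite | github.com/NetLockJ/advent-of-code | 2024/Day-22/part1.py | generate_secrets
-- ===== SOURCE A (Python) =====
-- def mix(secret, mixing):
--     return secret ^ mixing
--
-- def prune(secret):
--     return secret % 16777216
--
-- def generate_secrets(nums, iterations):
--     new_nums = []
--     for num in nums:
--         for _ in range(iterations):
--             num = prune(mix(num, num * 64))
--             num = prune(mix(num, num // 32))
--             num = prune(mix(num, num * 2048))
--         new_nums.append(num)
--     return new_nums
-- ===== SOURCE B (Python) =====
-- MASK = 16777215  # 2**24 - 1
--
--
-- def _step(v):
--     v = (v ^ (v << 6)) & MASK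
--     v = (v ^ (v >> 5)) & MASK
--     v = (v ^ (v << 11)) & MASK
--     return v
--
--
-- def _apply(rows, v):
--     # XOR together the rows selected by the set bits of v.
--     r = 0
--     i = 0
--     while v:
--         if v & 1:
--             r ^= rows[i]
--         v >>= 1
--         i += 1
--     return r
--
--
-- def _compose(m, n):
--     # rows of the GF(2) linear map v -> m(n(v))
--     return [_apply(m, r) for r in n]
--
--
-- def generate_secrets(nums, iterations):
--     if iterations <= 0:
--         return list(nums)
--     # The PRNG step is linear over GF(2) on 24-bit states: represent it by its
--     # images of the basis vectors, then binary-exponentiate to `iterations`.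
--     base = [_step(1 << i) for i in range(24)]
--     result = [1 << i for i in range(24)]  # identity
--     e = iterations
--     while e:
--         if e & 1:
--             result = _compose(base, result)
--         base = _compose(base, base)
--         e >>= 1
--     return [_apply(result, num % 16777216) for num in nums]
-- ===== Notes on version B (the rewrite author's own statement) =====
-- stated objective: faster
-- what changed: The per-number loop of `iterations` PRNG steps is replaced by representing the 24-bit xorshift step as a GF(2)-linear map (its images of the 24 basis vectors), binary-exponentiating that map to `iterations`, and applying the resulting map once per input number.
import Mathlib
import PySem

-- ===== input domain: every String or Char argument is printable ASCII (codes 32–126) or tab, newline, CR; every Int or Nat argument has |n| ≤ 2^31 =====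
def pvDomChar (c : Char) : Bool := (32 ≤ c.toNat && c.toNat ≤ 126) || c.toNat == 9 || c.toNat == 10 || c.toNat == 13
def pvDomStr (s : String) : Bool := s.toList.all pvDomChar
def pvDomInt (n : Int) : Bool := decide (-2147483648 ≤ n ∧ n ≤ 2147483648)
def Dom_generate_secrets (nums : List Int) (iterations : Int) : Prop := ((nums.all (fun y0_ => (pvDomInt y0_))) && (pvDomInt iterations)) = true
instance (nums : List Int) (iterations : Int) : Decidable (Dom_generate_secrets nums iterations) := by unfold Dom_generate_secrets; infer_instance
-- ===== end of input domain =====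

-- B replaces the per-number loop of `iterations` PRNG steps by the step's GF(2) 24x24
-- bit-matrix raised to `iterations` by binary exponentiation, applied once per number
-- (objective: faster; a timing run measures the speed-up).


-- ===== PORT A =====
def pvMix (secret mixing : Int) : Int := PySem.Int.bxor secret mixing

def pvPrune (secret : Int) : Int := PySem.Int.mod secret 16777216

def generate_secrets (nums : List Int) (iterations : Int) : List Int :=
  nums.foldl (fun new_nums num =>
    new_nums ++ [(PySem.List.pyRange 0 iterations 1).foldl (fun num _ =>
      let num1 := pvPrune (pvMix num (num * 64))
      let num2 := pvPrune (pvMix num1 (PySem.Int.floordiv num1 32))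
      pvPrune (pvMix num2 (num2 * 2048))) num]) []

-- ===== PORT B =====
-- _step in Source B: the 24-bit xorshift step written with shifts and a mask
def pvStep (v : Nat) : Nat :=
  let a := (v ^^^ (v <<< 6)) &&& 16777215
  let b := (a ^^^ (a >>> 5)) &&& 16777215
  (b ^^^ (b <<< 11)) &&& 16777215

-- _apply in Source B: XOR of the rows selected by the set bits of v (the `while v:` loop)
def pvApply (rows : List Nat) (v : Nat) : Nat :=
  if v = 0 then 0 else
    match rows with
    | [] => 0
    | r :: rest => (if v &&& 1 = 1 then r else 0) ^^^ pvApply rest (v >>> 1)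

-- _compose in Source B: rows of the map v ↦ m(n(v))
def pvCompose (m n : List Nat) : List Nat := n.map (fun r => pvApply m r)

-- the `while e:` binary-exponentiation loop of Source B
def pvPowLoop (result base : List Nat) (e : Nat) : List Nat :=
  if h : e = 0 then result
  else pvPowLoop (if e &&& 1 = 1 then pvCompose base result else result)
    (pvCompose base base) (e >>> 1)
  decreasing_by
    simpa [Nat.shiftRight_one] using Nat.div_lt_self (Nat.pos_of_ne_zero h) one_lt_two

def generate_secrets_alt (nums : List Int) (iterations : Int) : List Int :=
  if iterations ≤ 0 then nums
  else
    let base := (List.range 24).map (fun i => pvStep (1 <<< i))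
    let ident := (List.range 24).map (fun i => 1 <<< i)
    let m := pvPowLoop ident base iterations.toNat
    nums.map (fun num => ((pvApply m (PySem.Int.mod num 16777216).toNat : Nat) : Int))

-- ===== PRECONDITION & SPEC =====
def Spec_generate_secrets (nums : List Int) (iterations : Int) (out : List Int) : Prop := out = generate_secrets_alt nums iterations
instance (nums : List Int) (iterations : Int) (out : List Int) : Decidable (Spec_generate_secrets nums iterations out) := by unfold Spec_generate_secrets; infer_instance

-- ===== CLAIM (what is proved, stated in full; the proofs are below) =====
def Claim_equal_generate_secrets : Prop := ∀ (nums : List Int) (iterations : Int), Dom_generate_secrets nums iterations → Spec_generate_secrets nums iterations (generate_secrets nums iterations)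

-- ===== LEMMAS AND PROOFS =====

theorem pv_bit_decomp (v : Nat) : ((v >>> 1) <<< 1) ^^^ (v &&& 1) = v := by
  rw [Nat.shiftRight_one, Nat.shiftLeft_eq, Nat.and_one_is_mod, pow_one]
  rcases Nat.mod_two_eq_zero_or_one v with h | h
  · rw [h]; simp; omega
  · rw [h]
    have : v / 2 * 2 = Nat.bit false (v / 2) := by simp [Nat.bit]; ring
    have h1 : (1 : Nat) = Nat.bit true 0 := by simp [Nat.bit]
    rw [this, h1, Nat.xor_bit]
    simp [Nat.bit]; omega

theorem pv_complement (n r : Nat) (h : r < 2 ^ n) : (2 ^ n - 1) ^^^ r = 2 ^ n - 1 - r := by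
  induction n generalizing r with
  | zero => interval_cases r; rfl
  | succ n ih =>
    have hd : r = Nat.bit (decide (r % 2 = 1)) (r / 2) := by
      rcases Nat.mod_two_eq_zero_or_one r with h2 | h2 <;> simp [Nat.bit, h2] <;> omega
    have hm : (2 ^ (n+1) - 1) = Nat.bit true (2 ^ n - 1) := by
      have := Nat.one_le_two_pow (n := n); simp [Nat.bit]; omega
    have hr2 : r / 2 < 2 ^ n := by omega
    rw [hm, hd, Nat.xor_bit, ih _ hr2]
    have := Nat.one_le_two_pow (n := n)
    rcases Nat.mod_two_eq_zero_or_one r with h2 | h2 <;> simp [Nat.bit, h2] <;> omega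

theorem pv_mod_xor (n x y : Nat) : (x ^^^ y) % 2 ^ n = (x % 2 ^ n) ^^^ (y % 2 ^ n) := by
  rw [← Nat.and_two_pow_sub_one_eq_mod, ← Nat.and_two_pow_sub_one_eq_mod,
    ← Nat.and_two_pow_sub_one_eq_mod, Nat.and_xor_distrib_right]

theorem pvApply_nil (v : Nat) : pvApply [] v = 0 := by
  unfold pvApply; split <;> rfl
theorem pvApply_zero (rows : List Nat) : pvApply rows 0 = 0 := by
  unfold pvApply; simp
theorem pvApply_cons (r : Nat) (rest : List Nat) (v : Nat) :
    pvApply (r :: rest) v = (if v &&& 1 = 1 then r else 0) ^^^ pvApply rest (v >>> 1) := by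
  by_cases h : v = 0
  · subst h; simp [pvApply, pvApply_zero]
  · rw [pvApply]; simp [h]
theorem pv_lin_zero (f : Nat → Nat) (hf : ∀ x y, f (x ^^^ y) = f x ^^^ f y) : f 0 = 0 := by
  have := hf 0 0; simp at this; omega

theorem pvApply_rows (f : Nat → Nat) (hf : ∀ x y, f (x ^^^ y) = f x ^^^ f y) :
    ∀ (n i v : Nat), v < 2 ^ n →
      pvApply ((List.range n).map (fun j => f (1 <<< (i + j)))) v = f (v <<< i) := by
  intro n
  induction n with
  | zero =>
    intro i v hv
    interval_cases v
    simp [pvApply_nil, Nat.zero_shiftLeft, pv_lin_zero f hf]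
  | succ n ih =>
    intro i v hv
    have hrows : (List.range (n+1)).map (fun j => f (1 <<< (i + j)))
        = f (1 <<< i) :: (List.range n).map (fun j => f (1 <<< ((i+1) + j))) := by
      simp only [List.range_succ_eq_map, List.map_cons, List.map_map, Nat.add_zero]
      refine congrArg₂ List.cons rfl ?_
      apply List.map_congr_left
      intro j _
      simp only [Function.comp_apply]
      congr 2
      omega
    have hv2 : v >>> 1 < 2 ^ n := by
      rw [Nat.shiftRight_one]
      have : v < 2 ^ n * 2 := by rw [← pow_succ]; exact hv
      omega
    rw [hrows, pvApply_cons, ih (i+1) _ hv2]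
    have hdec : v <<< i = (((v >>> 1) <<< 1) ^^^ (v &&& 1)) <<< i := by
      rw [pv_bit_decomp]
    rw [hdec, Nat.shiftLeft_xor_distrib, ← Nat.shiftLeft_add, hf]
    have h1 : (1 : Nat) + i = i + 1 := by omega
    rw [h1]
    rcases Nat.mod_two_eq_zero_or_one v with h2 | h2 <;>
      rw [Nat.and_one_is_mod, h2]
    · simp [Nat.zero_shiftLeft, pv_lin_zero f hf, Nat.xor_comm]
    · simp [Nat.xor_comm]

def pvRepr (M : List Nat) (f : Nat → Nat) : Prop :=
  M = (List.range 24).map (fun j => f (1 <<< j)) ∧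
  (∀ x y, f (x ^^^ y) = f x ^^^ f y) ∧
  (∀ v, v < 16777216 → f v < 16777216)

theorem pvApply_repr {M : List Nat} {f : Nat → Nat} (h : pvRepr M f) {v : Nat}
    (hv : v < 16777216) : pvApply M v = f v := by
  obtain ⟨hM, hlin, _⟩ := h
  have h24 : (16777216 : Nat) = 2 ^ 24 := by norm_num
  have := pvApply_rows f hlin 24 0 v (by omega)
  simp only [Nat.zero_add, Nat.shiftLeft_zero] at this
  rw [hM]
  exact this

theorem pvRepr_compose {M N : List Nat} {fM fN : Nat → Nat}
    (hM : pvRepr M fM) (hN : pvRepr N fN) : pvRepr (pvCompose M N) (fM ∘ fN) := by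
  obtain ⟨hN1, hN2, hN3⟩ := hN
  refine ⟨?_, ?_, ?_⟩
  · unfold pvCompose
    rw [hN1, List.map_map]
    apply List.map_congr_left
    intro j hj
    simp only [List.mem_range] at hj
    simp only [Function.comp_apply]
    apply pvApply_repr hM
    apply hN3
    have : (1 : Nat) <<< j = 2 ^ j := by rw [Nat.shiftLeft_eq]; omega
    rw [this]
    calc (2:Nat) ^ j < 2 ^ 24 := by exact Nat.pow_lt_pow_right (by omega) hj
    _ = 16777216 := by norm_num
  · intro x y
    simp only [Function.comp_apply, hN2, (hM.2.1)]
  · intro v hv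
    exact hM.2.2 _ (hN3 _ hv)

theorem pvRepr_id : pvRepr ((List.range 24).map (fun i => 1 <<< i)) id := by
  refine ⟨rfl, fun _ _ => rfl, fun _ h => h⟩

theorem pvRepr_ext {M : List Nat} {f g : Nat → Nat} (h : pvRepr M f)
    (hfg : ∀ x, f x = g x) : pvRepr M g := by
  have : f = g := funext hfg
  rwa [this] at h

theorem pvRepr_powLoop {R B : List Nat} {fR fB : Nat → Nat}
    (hR : pvRepr R fR) (hB : pvRepr B fB) (e : Nat) :
    pvRepr (pvPowLoop R B e) (fB^[e] ∘ fR) := by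
  induction e using Nat.strong_induction_on generalizing R B fR fB with
  | _ e ih =>
    by_cases h : e = 0
    · subst h
      rw [pvPowLoop]
      simpa using hR
    · rw [pvPowLoop]
      simp only [h, dite_false]
      have hlt : e >>> 1 < e := by
        simpa [Nat.shiftRight_one] using Nat.div_lt_self (Nat.pos_of_ne_zero h) one_lt_two
      have hBB : pvRepr (pvCompose B B) (fB ∘ fB) := pvRepr_compose hB hB
      by_cases ho : e &&& 1 = 1
      · simp only [ho, if_true]
        have := ih _ hlt (pvRepr_compose hB hR) hBB
        apply pvRepr_ext this
        intro x
        simp only [Function.comp_apply]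
        have h2 : (fB ∘ fB) = fB^[2] := by
          funext z; simp [Function.iterate_succ_apply']
        rw [h2, ← Function.iterate_mul]
        have he : 2 * (e >>> 1) + 1 = e := by
          rw [Nat.shiftRight_one]
          have := Nat.and_one_is_mod e
          omega
        rw [← Function.iterate_succ_apply, Nat.succ_eq_add_one, he]
      · simp only [ho, if_false]
        have := ih _ hlt hR hBB
        apply pvRepr_ext this
        intro x
        simp only [Function.comp_apply]
        have h2 : (fB ∘ fB) = fB^[2] := by
          funext z; simp [Function.iterate_succ_apply']
        rw [h2, ← Function.iterate_mul]
        have he : 2 * (e >>> 1) = e := by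
          rw [Nat.shiftRight_one]
          have := Nat.and_one_is_mod e
          omega
        rw [he]

theorem pv_stage_lin (h : Nat → Nat) (hh : ∀ x y, h (x ^^^ y) = h x ^^^ h y) (x y : Nat) :
    ((x ^^^ y) ^^^ h (x ^^^ y)) &&& 16777215
      = (((x ^^^ h x) &&& 16777215) ^^^ ((y ^^^ h y) &&& 16777215)) := by
  rw [hh, ← Nat.and_xor_distrib_right]
  congr 1
  rw [Nat.xor_assoc, Nat.xor_assoc]
  congr 1
  rw [← Nat.xor_assoc, ← Nat.xor_assoc]
  congr 1
  exact Nat.xor_comm _ _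

theorem pvStep_lin (x y : Nat) : pvStep (x ^^^ y) = pvStep x ^^^ pvStep y := by
  unfold pvStep
  simp only []
  rw [pv_stage_lin (· <<< 6) (fun a b => Nat.shiftLeft_xor_distrib) x y]
  rw [pv_stage_lin (· >>> 5) (fun a b => Nat.shiftRight_xor_distrib)]
  rw [pv_stage_lin (· <<< 11) (fun a b => Nat.shiftLeft_xor_distrib)]

theorem pv_and_lt (x : Nat) : x &&& 16777215 < 16777216 :=
  lt_of_le_of_lt Nat.and_le_right (by norm_num)

theorem pvStep_lt (v : Nat) : pvStep v < 16777216 := by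
  unfold pvStep
  exact pv_and_lt _

theorem pvRepr_step : pvRepr ((List.range 24).map (fun i => pvStep (1 <<< i))) pvStep :=
  ⟨rfl, pvStep_lin, fun v _ => pvStep_lt v⟩

def pvLow24 (a : Int) : Nat := (a % 16777216).toNat

theorem pvLow24_cast (a : Int) : ((pvLow24 a : Nat) : Int) = a % 16777216 := by
  unfold pvLow24
  exact Int.toNat_of_nonneg (Int.emod_nonneg a (by norm_num))

theorem pvLow24_lt (a : Int) : pvLow24 a < 16777216 := by
  unfold pvLow24
  have h1 := Int.emod_lt_of_pos a (b := 16777216) (by norm_num)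
  have h2 := Int.emod_nonneg a (b := 16777216) (by norm_num)
  omega

theorem pvLow24_natCast (n : Nat) (h : n < 16777216) : pvLow24 (n : Int) = n := by
  unfold pvLow24
  rw [Int.emod_eq_of_lt (by positivity) (by exact_mod_cast h)]
  exact Int.toNat_natCast n

theorem pvLow24_nonneg (a : Int) (h : 0 ≤ a) : pvLow24 a = a.toNat % 16777216 := by
  unfold pvLow24
  omega

theorem pv_complement' (r : Nat) (h : r < 16777216) : 16777215 ^^^ r = 16777215 - r := by
  have := pv_complement 24 r (by norm_num at h ⊢; omega)
  norm_num at this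
  exact this

theorem pv_emod_neg (m : Nat) :
    (-(m : Int) - 1) % 16777216 = ((16777215 ^^^ (m % 16777216) : Nat) : Int) := by
  have hdm := Nat.div_add_mod m 16777216
  have hr : m % 16777216 < 16777216 := Nat.mod_lt _ (by norm_num)
  have key : -(m : Int) - 1
      = (16777215 - (m % 16777216 : Nat)) + 16777216 * (-(m / 16777216 : Nat) - 1) := by
    push_cast
    omega
  rw [key, Int.add_mul_emod_self_left,
    Int.emod_eq_of_lt (by push_cast; omega) (by push_cast; omega),
    pv_complement' _ hr]
  push_cast
  omega

theorem pvLow24_negSucc (m : Nat) : pvLow24 (-(m : Int) - 1) = 16777215 ^^^ (m % 16777216) := by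
  unfold pvLow24
  rw [pv_emod_neg]
  exact Int.toNat_natCast _

theorem pv_mod_xor' (x y : Nat) : (x ^^^ y) % 16777216 = (x % 16777216) ^^^ (y % 16777216) := by
  have := pv_mod_xor 24 x y
  norm_num at this
  exact this

theorem pv_bxor_mod (a b : Int) :
    (PySem.Int.bxor a b) % 16777216 = ((pvLow24 a ^^^ pvLow24 b : Nat) : Int) := by
  have hc : ∀ x : Nat, ((x : Int)) % 16777216 = ((x % 16777216 : Nat) : Int) := by
    intro x; omega
  unfold PySem.Int.bxor
  split_ifs with ha hb hb
  · rw [hc, pv_mod_xor', pvLow24_nonneg a ha, pvLow24_nonneg b hb]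
  · have hb' : b = -((-b - 1).toNat : Int) - 1 := by
      have := Int.toNat_of_nonneg (a := -b - 1) (by omega)
      omega
    rw [pv_emod_neg, pv_mod_xor']
    rw [pvLow24_nonneg a ha]
    conv_rhs => rw [hb']
    rw [pvLow24_negSucc]
    congr 1
    rw [Nat.xor_left_comm]
  · have ha' : a = -((-a - 1).toNat : Int) - 1 := by
      have := Int.toNat_of_nonneg (a := -a - 1) (by omega)
      omega
    rw [pv_emod_neg, pv_mod_xor']
    rw [pvLow24_nonneg b hb]
    conv_rhs => rw [ha']
    rw [pvLow24_negSucc]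
    congr 1
    simp [Nat.xor_comm, Nat.xor_left_comm]
  · have ha' : a = -((-a - 1).toNat : Int) - 1 := by
      have := Int.toNat_of_nonneg (a := -a - 1) (by omega)
      omega
    have hb' : b = -((-b - 1).toNat : Int) - 1 := by
      have := Int.toNat_of_nonneg (a := -b - 1) (by omega)
      omega
    rw [hc, pv_mod_xor']
    conv_rhs => rw [ha', hb']
    rw [pvLow24_negSucc, pvLow24_negSucc]
    congr 1
    simp [Nat.xor_comm, Nat.xor_left_comm]

theorem pv_mask_mod (x : Nat) : x &&& 16777215 = x % 16777216 := by
  have := Nat.and_two_pow_sub_one_eq_mod x 24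
  norm_num at this
  exact this

theorem pv_stepA (num : Int) :
    (let num1 := pvPrune (pvMix num (num * 64))
     let num2 := pvPrune (pvMix num1 (PySem.Int.floordiv num1 32))
     pvPrune (pvMix num2 (num2 * 2048))) = ((pvStep (pvLow24 num) : Nat) : Int) := by
  have hc : ∀ x : Nat, ((x : Int)) % 16777216 = ((x % 16777216 : Nat) : Int) := by
    intro x; omega
  set l := pvLow24 num with hl
  have hlt : l < 16777216 := pvLow24_lt num
  have hm64 : pvLow24 (num * 64) = (l <<< 6) &&& 16777215 := by
    unfold pvLow24
    rw [Int.mul_emod, ← pvLow24_cast num, ← hl]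
    norm_num
    rw [show ((l : Int) * 64) = ((l * 64 : Nat) : Int) by push_cast; ring, hc,
      Int.toNat_natCast, pv_mask_mod, Nat.shiftLeft_eq]
  have h1 : pvPrune (pvMix num (num * 64)) = (((l ^^^ l <<< 6) &&& 16777215 : Nat) : Int) := by
    unfold pvPrune pvMix
    rw [PySem.Int.mod_eq_emod_of_pos (by norm_num), pv_bxor_mod, ← hl, hm64]
    congr 1
    rw [Nat.and_xor_distrib_right, pv_mask_mod l, Nat.mod_eq_of_lt hlt]
  set n1 := (l ^^^ l <<< 6) &&& 16777215 with hn1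
  have h2 : pvPrune (pvMix ((n1 : Nat) : Int) (PySem.Int.floordiv ((n1 : Nat) : Int) 32))
      = (((n1 ^^^ n1 >>> 5) &&& 16777215 : Nat) : Int) := by
    unfold pvPrune pvMix
    rw [PySem.Int.floordiv_eq_ediv_of_pos (by norm_num)]
    rw [show ((n1 : Int)) / 32 = ((n1 / 32 : Nat) : Int) by omega]
    rw [PySem.Int.bxor_natCast, PySem.Int.mod_eq_emod_of_pos (by norm_num), hc]
    rw [pv_mask_mod, Nat.shiftRight_eq_div_pow]
  set n2 := (n1 ^^^ n1 >>> 5) &&& 16777215 with hn2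
  have h3 : pvPrune (pvMix ((n2 : Nat) : Int) (((n2 : Nat) : Int) * 2048))
      = (((n2 ^^^ n2 <<< 11) &&& 16777215 : Nat) : Int) := by
    unfold pvPrune pvMix
    rw [show ((n2 : Int) * 2048) = ((n2 * 2048 : Nat) : Int) by push_cast; ring]
    rw [PySem.Int.bxor_natCast, PySem.Int.mod_eq_emod_of_pos (by norm_num), hc]
    rw [pv_mask_mod, Nat.shiftLeft_eq]
  show pvPrune (pvMix (pvPrune (pvMix (pvPrune (pvMix num (num * 64)))
      (PySem.Int.floordiv (pvPrune (pvMix num (num * 64))) 32)))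
      ((pvPrune (pvMix (pvPrune (pvMix num (num * 64)))
        (PySem.Int.floordiv (pvPrune (pvMix num (num * 64))) 32))) * 2048)) = _
  rw [h1, h2, h3]
  rfl

def pvBodyA (num : Int) : Int :=
  let num1 := pvPrune (pvMix num (num * 64))
  let num2 := pvPrune (pvMix num1 (PySem.Int.floordiv num1 32))
  pvPrune (pvMix num2 (num2 * 2048))

theorem pv_foldl_const {α β : Type} (g : α → α) (l : List β) (x : α) :
    List.foldl (fun a _ => g a) x l = g^[l.length] x := by
  induction l generalizing x with
  | nil => rfl
  | cons b t ih => simp [List.foldl_cons, ih, Function.iterate_succ_apply]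

theorem pv_iterA (j : Nat) (n : Nat) (hn : n < 16777216) :
    pvBodyA^[j] ((n : Nat) : Int) = ((pvStep^[j] n : Nat) : Int) := by
  induction j generalizing n with
  | zero => simp
  | succ j ih =>
    rw [Function.iterate_succ_apply, Function.iterate_succ_apply]
    have hb : pvBodyA ((n : Nat) : Int) = ((pvStep n : Nat) : Int) := by
      have := pv_stepA ((n : Nat) : Int)
      rw [pvLow24_natCast n hn] at this
      exact this
    rw [hb, ih _ (pvStep_lt n)]

theorem pv_main (nums : List Int) (iterations : Int) :
    generate_secrets nums iterations = generate_secrets_alt nums iterations := by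
  unfold generate_secrets
  rw [PySem.List.foldl_append_singleton_eq_map]
  rw [List.nil_append]
  have hlen : (PySem.List.pyRange 0 iterations 1).length = iterations.toNat := by
    rw [PySem.List.length_pyRange_one]; simp
  have hfold : ∀ num : Int,
      (PySem.List.pyRange 0 iterations 1).foldl (fun num _ =>
        let num1 := pvPrune (pvMix num (num * 64))
        let num2 := pvPrune (pvMix num1 (PySem.Int.floordiv num1 32))
        pvPrune (pvMix num2 (num2 * 2048))) num = pvBodyA^[iterations.toNat] num := by
    intro num
    rw [← hlen]
    exact pv_foldl_const pvBodyA _ num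
  by_cases hle : iterations ≤ 0
  · have h0 : iterations.toNat = 0 := by omega
    unfold generate_secrets_alt
    rw [if_pos hle]
    have hids : ∀ num ∈ nums, (PySem.List.pyRange 0 iterations 1).foldl (fun num _ =>
        let num1 := pvPrune (pvMix num (num * 64))
        let num2 := pvPrune (pvMix num1 (PySem.Int.floordiv num1 32))
        pvPrune (pvMix num2 (num2 * 2048))) num = num := by
      intro num _
      rw [hfold num, h0]
      rfl
    rw [List.map_congr_left hids, List.map_id']
  · have hpos : ¬ iterations ≤ 0 := hle
    obtain ⟨j, hj⟩ : ∃ j, iterations.toNat = j + 1 := by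
      refine ⟨iterations.toNat - 1, ?_⟩; omega
    unfold generate_secrets_alt
    rw [if_neg hpos]
    have hrepr : pvRepr (pvPowLoop ((List.range 24).map (fun i => 1 <<< i))
        ((List.range 24).map (fun i => pvStep (1 <<< i))) iterations.toNat)
        (pvStep^[iterations.toNat] ∘ id) :=
      pvRepr_powLoop pvRepr_id pvRepr_step iterations.toNat
    rw [hj] at hrepr
    apply List.map_congr_left
    intro num _
    rw [hfold num, hj]
    have hl : (PySem.Int.mod num 16777216).toNat = pvLow24 num := by
      rw [PySem.Int.mod_eq_emod_of_pos (by norm_num)]; rfl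
    rw [hl, pvApply_repr hrepr (pvLow24_lt num)]
    simp only [Function.comp_apply, id_eq]
    rw [Function.iterate_succ_apply]
    have hb : pvBodyA num = ((pvStep (pvLow24 num) : Nat) : Int) := pv_stepA num
    rw [hb, pv_iterA j _ (pvStep_lt _), ← hj]
    rw [hj, Function.iterate_succ_apply]

-- ===== VERDICT (by name: the statement is the Claim_ definition above) =====
theorem generate_secrets_spec : Claim_equal_generate_secrets := by
  intro nums iterations _
  show generate_secrets nums iterations = generate_secrets_alt nums iterations
  exact pv_main nums iterations
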